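-- pv_equiv track=rewrite | github.com/CookiesDan220603/Python-basic | myselft/khoi.py | sumarry
-- ===== SOURCE A (Python) =====
-- def sumarry (arr,n,a):
-- 	tong =0
-- 	j=0
-- 	k=0
-- 	count =0
-- 	for i in range (1,n+1):
-- 		count =0
-- 		for j in range (0,a):
-- 			if int(arr[j])>0:
-- 				if i%int(arr[j])==0:
-- 					count+=1
-- 		if count >0:
-- 			tong +=i
-- 	return tong
-- ===== SOURCE B (Python) =====
-- def sumarry(arr, n, a):
--     # Collect the distinct positive divisors once, then mark their multiples
--     # with a sieve instead of testing every divisor for every i.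
--     divs = {d for d in arr[:max(a, 0)] if d > 0}
--     if n < 1:
--         return 0
--     covered = [False] * (n + 1)
--     for d in divs:
--         for m in range(d, n + 1, d):
--             covered[m] = True
--     return sum(i for i in range(1, n + 1) if covered[i])
-- ===== Notes on version B (the rewrite author's own statement) =====
-- stated objective: faster
-- what changed: Instead of testing every arr[j] against every i in a nested O(n*a) loop, B collects the distinct positive elements of arr[:a] once and marks their multiples up to n with a sieve, then sums the marked indices.
import Mathlib
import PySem

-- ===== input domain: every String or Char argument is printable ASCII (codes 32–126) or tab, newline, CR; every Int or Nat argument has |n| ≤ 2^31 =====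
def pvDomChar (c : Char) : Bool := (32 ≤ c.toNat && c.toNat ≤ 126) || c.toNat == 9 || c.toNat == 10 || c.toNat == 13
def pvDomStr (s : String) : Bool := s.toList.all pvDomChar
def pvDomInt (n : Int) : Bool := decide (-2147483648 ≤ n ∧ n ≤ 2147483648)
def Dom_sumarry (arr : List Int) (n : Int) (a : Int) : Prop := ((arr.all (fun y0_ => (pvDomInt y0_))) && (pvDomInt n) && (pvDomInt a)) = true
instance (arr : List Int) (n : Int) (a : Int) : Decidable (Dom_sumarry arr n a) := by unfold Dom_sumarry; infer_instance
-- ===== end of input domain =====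

-- B replaces A's nested divisor test (every arr[j] against every i) by a sieve over the
-- distinct positive elements of arr[:a]; objective: faster (asymptotic).


-- ===== PORT A =====
-- for i in range(1,n+1): count = #{j in range(0,a) | int(arr[j]) > 0 and i % int(arr[j]) == 0};
-- tong += i if count > 0  (int() on an int is the identity; arr[j] is pyGetD, total under Pre_)
def sumarry (arr : List Int) (n : Int) (a : Int) : Int :=
  (PySem.List.pyRange 1 (n + 1) 1).foldl (fun tong i =>
    let count : Int :=
      (PySem.List.pyRange 0 a 1).foldl (fun count j =>
        if PySem.List.pyGetD arr j 0 > 0 then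
          (if PySem.Int.mod i (PySem.List.pyGetD arr j 0) = 0 then count + 1 else count)
        else count) 0
    if count > 0 then tong + i else tong) 0

-- ===== PORT B =====
-- divs = {d for d in arr[:max(a,0)] if d > 0}; covered = [False]*(n+1); sieve-mark every
-- multiple of each d; sum the marked i in 1..n  (result is independent of set iteration order)
def sumarry_alt (arr : List Int) (n : Int) (a : Int) : Int :=
  let divs : PySem.Set Int :=
    PySem.Set.ofList ((PySem.List.slice arr none (some (max a 0))).filter (fun d => d > 0))
  if n < 1 then 0
  else
    let covered : List Bool := divs.foldl (fun c d =>
      (PySem.List.pyRange d (n + 1) d).foldl (fun c m => PySem.List.pySetD c m true) c)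
      (List.replicate (n + 1).toNat false)
    (PySem.List.pyRange 1 (n + 1) 1).foldl (fun s i =>
      if PySem.List.pyGetD covered i false then s + i else s) 0

-- ===== PRECONDITION & SPEC =====
-- Pre_ excludes exactly the inputs where A raises IndexError: a > len(arr) with at least one
-- outer iteration (n >= 1).
def Pre_sumarry (arr : List Int) (n : Int) (a : Int) : Prop :=
  a ≤ (arr.length : Int) ∨ a ≤ 0 ∨ n < 1
instance (arr : List Int) (n : Int) (a : Int) : Decidable (Pre_sumarry arr n a) := by
  unfold Pre_sumarry; infer_instance
def pvWitness_sumarry : List Int × Int × Int := ([2, 3, -1], 10, 3)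

def Spec_sumarry (arr : List Int) (n : Int) (a : Int) (out : Int) : Prop := out = sumarry_alt arr n a
instance (arr : List Int) (n : Int) (a : Int) (out : Int) : Decidable (Spec_sumarry arr n a out) := by unfold Spec_sumarry; infer_instance

-- ===== CLAIM (what is proved, stated in full; the proofs are below) =====
def Claim_equal_sumarry : Prop := ∀ (arr : List Int) (n : Int) (a : Int), Dom_sumarry arr n a → Pre_sumarry arr n a → Spec_sumarry arr n a (sumarry arr n a)

-- ===== LEMMAS AND PROOFS =====

-- A's inner loop, run over a plain list, is init + countP (positive divisor of i).
theorem countFold_eq_countP (L : List Int) (i : Int) (init : Int) :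
    L.foldl (fun count v =>
      if v > 0 then (if PySem.Int.mod i v = 0 then count + 1 else count) else count) init
      = init + (L.countP (fun v => decide (0 < v) && decide (v ∣ i)) : Int) := by
  induction L generalizing init with
  | nil => simp
  | cons x xs ih =>
    simp only [List.foldl_cons, List.countP_cons, ih]
    by_cases hx : x > 0
    · by_cases hd : PySem.Int.mod i x = 0
      · have : x ∣ i := (PySem.Int.mod_eq_zero_iff_dvd i x).mp hd
        simp [hx, this]; ring
      · have : ¬ x ∣ i := fun h => hd ((PySem.Int.mod_eq_zero_iff_dvd i x).mpr h)
        simp [hx, this]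
    · simp [hx]

theorem pyGetD_set_aux (c : List Bool) (m i : Int) (hm0 : 0 ≤ m) (hml : m < (c.length : Int)) (hi : 0 ≤ i) :
    PySem.List.pyGetD (PySem.List.pySetD c m true) i false
      = (if i = m then true else PySem.List.pyGetD c i false) := by
  have hm : m = ((m.toNat : Nat) : Int) := (Int.toNat_of_nonneg hm0).symm
  have hi' : i = ((i.toNat : Nat) : Int) := (Int.toNat_of_nonneg hi).symm
  rw [hm, hi', PySem.List.pyGetD_pySetD_natCast c m.toNat i.toNat true false (by omega)]
  by_cases h : i.toNat = m.toNat
  · rw [if_pos h, if_pos (by exact_mod_cast h)]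
  · rw [if_neg h, if_neg (by exact_mod_cast h)]

-- Marking a list of in-range, nonnegative indices true, then reading a nonnegative index i.
theorem pyGetD_foldl_pySetD (ms : List Int) (c : List Bool) (i : Int) (hi : 0 ≤ i)
    (hms : ∀ m ∈ ms, 0 ≤ m ∧ m < (c.length : Int)) :
    PySem.List.pyGetD (ms.foldl (fun c m => PySem.List.pySetD c m true) c) i false
      = (if i ∈ ms then true else PySem.List.pyGetD c i false) := by
  induction ms generalizing c with
  | nil => simp
  | cons m ms ih =>
    have hm := hms m (by simp)
    have hlen : ((PySem.List.pySetD c m true).length : Int) = (c.length : Int) := by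
      rw [PySem.List.length_pySetD]
    rw [List.foldl_cons, ih (PySem.List.pySetD c m true)
        (by intro x hx; rw [hlen]; exact hms x (by simp [hx]))]
    rw [pyGetD_set_aux c m i hm.1 hm.2 hi]
    by_cases h1 : i ∈ ms <;> by_cases h2 : i = m <;> simp [h1, h2]

-- The sieve fold: covered[i] is true iff some divisor's multiple list contains i.
theorem covered_spec (D : List Int) (n : Int) (hD : ∀ d ∈ D, 0 < d)
    (c : List Bool) (hc : (c.length : Int) = n + 1) (i : Int) (hi : 0 ≤ i) :
    PySem.List.pyGetD (D.foldl (fun c d =>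
        (PySem.List.pyRange d (n + 1) d).foldl (fun c m => PySem.List.pySetD c m true) c) c) i false
      = (if ∃ d ∈ D, i ∈ PySem.List.pyRange d (n + 1) d then true else PySem.List.pyGetD c i false) := by
  induction D generalizing c with
  | nil => simp
  | cons d D ih =>
    have hd := hD d (by simp)
    have hlen : ∀ (c' : List Bool), ((PySem.List.pyRange d (n+1) d).foldl
        (fun c m => PySem.List.pySetD c m true) c').length = c'.length := by
      intro c'
      induction (PySem.List.pyRange d (n+1) d) generalizing c' with
      | nil => rfl
      | cons m ms ihm => rw [List.foldl_cons, ihm, PySem.List.length_pySetD]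
    rw [List.foldl_cons, ih (fun x hx => hD x (by simp [hx])) _ (by rw [hlen]; exact hc)]
    rw [pyGetD_foldl_pySetD _ c i hi]
    · by_cases h1 : ∃ x ∈ D, i ∈ PySem.List.pyRange x (n + 1) x
      · simp [h1]
      · by_cases h2 : i ∈ PySem.List.pyRange d (n + 1) d <;> simp [h1, h2]
    · intro m hm
      have := (PySem.List.mem_pyRange_iff_of_pos hd m).mp hm
      constructor <;> [omega; (rw [hc]; omega)]

-- A's inner loop equals countP over the prefix arr[:max(a,0)], given the indices are in range.
theorem inner_eq (arr : List Int) (a i : Int) (hpre : a ≤ (arr.length : Int) ∨ a ≤ 0) :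
    (PySem.List.pyRange 0 a 1).foldl (fun count j =>
        if PySem.List.pyGetD arr j 0 > 0 then
          (if PySem.Int.mod i (PySem.List.pyGetD arr j 0) = 0 then count + 1 else count)
        else count) 0
      = ((arr.take (max a 0).toNat).countP (fun v => decide (0 < v) && decide (v ∣ i)) : Int) := by
  by_cases ha : a ≤ 0
  · rw [PySem.List.pyRange_one_eq_nil ha]
    have : (max a 0).toNat = 0 := by omega
    simp [this]
  · have hal : a ≤ (arr.length : Int) := by omega
    have hmax : (max a 0) = a := by omega
    set L := arr.take (max a 0).toNat with hL
    have hLlen : (L.length : Int) = a := by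
      rw [hL, List.length_take]; omega
    have hgd : ∀ j ∈ PySem.List.pyRange 0 a 1,
        PySem.List.pyGetD arr j 0 = PySem.List.pyGetD L j 0 := by
      intro j hj
      have hj' := (PySem.List.mem_pyRange_one).mp hj
      rw [PySem.List.pyGetD_eq_getElem arr 0 hj'.1 (by omega),
          PySem.List.pyGetD_eq_getElem L 0 hj'.1 (by omega)]
      exact (List.getElem_take).symm
    rw [PySem.List.foldl_congr_mem _ _
        (fun count j =>
          if PySem.List.pyGetD L j 0 > 0 then
            (if PySem.Int.mod i (PySem.List.pyGetD L j 0) = 0 then count + 1 else count)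
          else count) 0
        (by intro acc j hj; rw [hgd j hj]),
        ← hLlen,
        PySem.List.foldl_pyRange_zero_pyGetD' L 0
          (fun count v => if v > 0 then (if PySem.Int.mod i v = 0 then count + 1 else count) else count) 0,
        countFold_eq_countP]
    simp

-- ===== VERDICT (by name: the statement is the Claim_ definition above) =====
theorem sumarry_spec : Claim_equal_sumarry := by
  intro arr n a _ hpre
  unfold Spec_sumarry sumarry sumarry_alt
  by_cases hn : n < 1
  · rw [if_pos hn, PySem.List.pyRange_one_eq_nil (show n + 1 ≤ 1 by omega)]
    rfl
  · rw [if_neg hn]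
    have hn1 : 1 ≤ n := by omega
    have hpre' : a ≤ (arr.length : Int) ∨ a ≤ 0 := by
      rcases hpre with h | h | h
      · exact Or.inl h
      · exact Or.inr h
      · omega
    set L := arr.take (max a 0).toNat with hL
    have hslice : PySem.List.slice arr none (some (max a 0)) = L := by
      rw [PySem.List.slice_to arr (by omega)]
    set p : Int → Int → Bool := fun i v => decide (0 < v) && decide (v ∣ i) with hp
    set D : PySem.Set Int := PySem.Set.ofList (L.filter (fun d => d > 0)) with hD
    have hDpos : ∀ d ∈ D, 0 < d := by
      intro d hd
      rw [hD, PySem.Set.mem_ofList] at hd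
      have := (List.mem_filter.mp hd).2
      simpa using this
    have hrep : ((List.replicate (n + 1).toNat false).length : Int) = n + 1 := by
      rw [List.length_replicate]; omega
    rw [hslice]
    apply PySem.List.foldl_congr_mem
    intro acc i hi
    have hi' := (PySem.List.mem_pyRange_one).mp hi
    rw [inner_eq arr a i hpre', ← hL]
    rw [covered_spec D n hDpos _ hrep i (by omega)]
    have hbase : PySem.List.pyGetD (List.replicate (n + 1).toNat false) i false = false := by
      have hlen2 : i < ((List.replicate (n + 1).toNat false).length : Int) := by omega
      rw [PySem.List.pyGetD_eq_getElem (List.replicate (n + 1).toNat false) (i := i) false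
          (by omega) hlen2]
      simp
    have hiff : (∃ d ∈ D, i ∈ PySem.List.pyRange d (n + 1) d) ↔ ∃ v ∈ L, p i v = true := by
      constructor
      · rintro ⟨d, hd, hmem⟩
        have hdpos := hDpos d hd
        have hm := (PySem.List.mem_pyRange_iff_of_pos hdpos i).mp hmem
        have hdvd : d ∣ i := by
          have h2 : d ∣ i - d := hm.2.2
          have h3 := dvd_add h2 (dvd_refl d)
          simpa using h3
        refine ⟨d, ?_, ?_⟩
        · rw [hD, PySem.Set.mem_ofList] at hd; exact (List.mem_filter.mp hd).1
        · simp [hp, hdpos, hdvd]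
      · rintro ⟨v, hv, hpv⟩
        simp only [hp, Bool.and_eq_true, decide_eq_true_eq] at hpv
        refine ⟨v, ?_, ?_⟩
        · rw [hD, PySem.Set.mem_ofList]
          exact List.mem_filter.mpr ⟨hv, by simpa using hpv.1⟩
        · rw [PySem.List.mem_pyRange_iff_of_pos hpv.1 i]
          refine ⟨Int.le_of_dvd (by omega) hpv.2, by omega, ?_⟩
          exact dvd_sub hpv.2 (dvd_refl v)
    have hcount : ((L.countP (p i) : Int) > 0) ↔ ∃ v ∈ L, p i v = true := by
      rw [gt_iff_lt, Int.natCast_pos, List.countP_pos_iff]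
    by_cases hcond : ∃ v ∈ L, p i v = true
    · rw [if_pos (hiff.mpr hcond), if_pos (hcount.mpr hcond), if_pos rfl]
    · rw [if_neg (fun h => hcond (hiff.mp h)), if_neg (fun h => hcond (hcount.mp h)), hbase]
      simp
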